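-- pv_equiv track=rewrite | github.com/EinPy/Competition_lib | CodeForces/Practice/Everything/BeatifulStiring.py | solve
-- ===== SOURCE A (Python) =====
-- def solve(n, k):
--     #  N*((2A1+ (N-1)*D)/2).
--     s = ['a'] * n
--     for i in range(n - 2, -1, -1):
--         if k <= n - i - 1:
--             s[i] = 'b'
--             s[n-k] = 'b'
--             return ''.join(s)
--         k -= n - i - 1
-- ===== SOURCE B (Python) =====
-- def solve(n, k):
--     if n < 2 or k < 1 or k > (n - 1) * n // 2:
--         return None
--     # binary search for the smallest j in [1, n-1] with j*(j+1)//2 >= k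
--     lo, hi = 1, n - 1
--     while lo < hi:
--         mid = (lo + hi) // 2
--         if k <= mid * (mid + 1) // 2:
--             hi = mid
--         else:
--             lo = mid + 1
--     j = lo
--     r = k - (j - 1) * j // 2
--     s = ['a'] * n
--     s[n - 1 - j] = 'b'
--     s[n - r] = 'b'
--     return ''.join(s)
-- ===== Notes on version B (the rewrite author's own statement) =====
-- stated objective: alternative
-- what changed: Replaces A's descending O(n) subtraction scan with a binary search for the smallest j with j*(j+1)//2 >= k (closed triangular-number characterisation), plus an up-front range test for the None case; the string itself is still built once.
import Mathlib
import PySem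

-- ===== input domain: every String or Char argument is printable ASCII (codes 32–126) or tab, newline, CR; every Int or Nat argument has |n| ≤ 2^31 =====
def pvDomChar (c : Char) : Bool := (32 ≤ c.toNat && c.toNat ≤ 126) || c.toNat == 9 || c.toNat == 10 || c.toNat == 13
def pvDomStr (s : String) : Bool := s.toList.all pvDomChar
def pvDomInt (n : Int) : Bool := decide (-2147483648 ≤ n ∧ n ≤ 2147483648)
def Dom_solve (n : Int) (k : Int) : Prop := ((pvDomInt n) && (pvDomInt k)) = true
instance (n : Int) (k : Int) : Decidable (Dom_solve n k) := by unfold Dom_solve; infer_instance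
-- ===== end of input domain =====

-- B replaces A's descending subtraction scan by a binary search for the smallest j with
-- j*(j+1)//2 >= k (alternative algorithm; return-value equivalence on Pre_solve).

-- ===== PORT A =====
-- the for-loop over range(n-2,-1,-1) with early return; list assignment s[i]='b' is ported
-- with List.set on toNat indices (exact on Pre_solve, where both indices are in range).
def solveGo (n : Int) : List Int → Int → Option String
  | [], _ => none
  | i :: rest, k =>
    if k ≤ n - i - 1 then
      some (String.mk (((List.replicate n.toNat 'a').set i.toNat 'b').set (n - k).toNat 'b'))
    else solveGo n rest (k - (n - i - 1))

def solve (n : Int) (k : Int) : Option String :=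
  solveGo n (PySem.List.pyRange (n - 2) (-1) (-1)) k

-- ===== PORT B =====
-- binary search: smallest j in [lo, hi] with j*(j+1)//2 >= k (Source B's while loop)
def bsearchB (k lo hi : Int) : Int :=
  if h : lo < hi then
    let mid := PySem.Int.floordiv (lo + hi) 2
    if k ≤ PySem.Int.floordiv (mid * (mid + 1)) 2 then bsearchB k lo mid
    else bsearchB k (mid + 1) hi
  else lo
termination_by (hi - lo).toNat
decreasing_by
  · have h1 := PySem.Int.floordiv_two_mid_bounds (le_of_lt h)
    have h2 : PySem.Int.floordiv (lo + hi) 2 < hi := by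
      rw [PySem.Int.floordiv_lt_iff_lt_mul (by omega : (0:Int) < 2)]; omega
    omega
  · have h1 := PySem.Int.floordiv_two_mid_bounds (le_of_lt h)
    omega

def solve_alt (n : Int) (k : Int) : Option String :=
  if n < 2 ∨ k < 1 ∨ PySem.Int.floordiv ((n - 1) * n) 2 < k then none
  else
    let j := bsearchB k 1 (n - 1)
    let r := k - PySem.Int.floordiv ((j - 1) * j) 2
    some (String.mk (((List.replicate n.toNat 'a').set (n - 1 - j).toNat 'b').set (n - r).toNat 'b'))

-- ===== PRECONDITION & SPEC =====
-- Pre_solve excludes exactly the inputs (n ≥ 2 ∧ k ≤ 0) on which A raises IndexError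
-- (s[n-k] with n-k ≥ len(s)); A returns normally on every input satisfying Pre_solve.
def Pre_solve (n : Int) (k : Int) : Prop := n ≤ 1 ∨ 1 ≤ k
instance (n : Int) (k : Int) : Decidable (Pre_solve n k) := by unfold Pre_solve; infer_instance
def pvWitness_solve : Int × Int := (5, 3)

def Spec_solve (n : Int) (k : Int) (out : Option String) : Prop := out = solve_alt n k
instance (n : Int) (k : Int) (out : Option String) : Decidable (Spec_solve n k out) := by unfold Spec_solve; infer_instance

-- ===== CLAIM (what is proved, stated in full; the proofs are below) =====
def Claim_equal_solve : Prop := ∀ (n : Int) (k : Int), Dom_solve n k → Pre_solve n k → Spec_solve n k (solve n k)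
-- ===== LEMMAS AND PROOFS =====

-- triangular numbers
def Tn : Nat → Int
  | 0 => 0
  | m + 1 => Tn m + (m + 1)

theorem two_Tn (m : Nat) : 2 * Tn m = (m : Int) * (m + 1) := by
  induction m with
  | zero => simp [Tn]
  | succ m ih => simp only [Tn]; push_cast; push_cast at ih; nlinarith [ih]

theorem Tn_mono {a b : Nat} (h : a ≤ b) : Tn a ≤ Tn b := by
  induction b with
  | zero =>
    have ha : a = 0 := by omega
    rw [ha]
  | succ b ih =>
    rcases Nat.lt_or_ge a (b + 1) with h' | h'
    · have := ih (by omega)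
      simp only [Tn]; have : (0:Int) ≤ (b:Int) + 1 := by positivity
      push_cast; omega
    · have : a = b + 1 := by omega
      subst this; exact le_refl _

theorem fd_Tn (j : Int) (hj : 0 ≤ j) :
    PySem.Int.floordiv (j * (j + 1)) 2 = Tn j.toNat := by
  have hcast : j = (j.toNat : Int) := by omega
  have h2 := two_Tn j.toNat
  rw [PySem.Int.floordiv_eq_iff_of_pos (by omega : (0:Int) < 2)]
  constructor <;> [nlinarith [h2, hcast]; nlinarith [h2, hcast]]

theorem Tn_step_int (a : Int) (ha : 0 ≤ a) :
    Tn (a + 1).toNat = Tn a.toNat + (a + 1) := by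
  have h1 : (a + 1).toNat = a.toNat + 1 := by omega
  rw [h1]; simp only [Tn]; congr 1; omega

theorem Tn_mono_int {a b : Int} (ha : 0 ≤ a) (h : a ≤ b) :
    Tn a.toNat ≤ Tn b.toNat := Tn_mono (by omega)

-- binary-search correctness: bsearchB returns the least j with Tn j ≥ k in [lo, hi]
theorem bsearchB_spec (d : Nat) :
    ∀ (k lo hi : Int), (hi - lo).toNat = d → 1 ≤ lo → lo ≤ hi →
    Tn (lo - 1).toNat < k → k ≤ Tn hi.toNat →
    1 ≤ bsearchB k lo hi ∧ bsearchB k lo hi ≤ hi ∧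
    Tn (bsearchB k lo hi - 1).toNat < k ∧ k ≤ Tn (bsearchB k lo hi).toNat := by
  induction d using Nat.strong_induction_on with
  | _ d ih =>
    intro k lo hi hd hlo hle hlt hub
    rw [bsearchB]
    by_cases h : lo < hi
    · simp only [dif_pos h]
      have hmid := PySem.Int.floordiv_two_mid_bounds (le_of_lt h)
      have hmidlt : PySem.Int.floordiv (lo + hi) 2 < hi := by
        rw [PySem.Int.floordiv_lt_iff_lt_mul (by omega : (0:Int) < 2)]; omega
      set mid := PySem.Int.floordiv (lo + hi) 2 with hmiddef
      have hmid0 : 0 ≤ mid := by omega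
      rw [fd_Tn mid hmid0]
      by_cases hk : k ≤ Tn mid.toNat
      · rw [if_pos hk]
        obtain ⟨a1, a2, a3, a4⟩ := ih (mid - lo).toNat (by omega) k lo mid (by omega) hlo (by omega) hlt hk
        exact ⟨a1, by omega, a3, a4⟩
      · rw [if_neg hk]
        have : Tn (mid + 1 - 1).toNat < k := by
          have : mid + 1 - 1 = mid := by omega
          rw [this]; omega
        exact ih (hi - (mid + 1)).toNat (by omega) k (mid + 1) hi rfl (by omega) (by omega) this hub
    · rw [dif_neg h]
      have : lo = hi := by omega
      subst this
      exact ⟨hlo, le_refl _, hlt, hub⟩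

-- A's loop over [m-1, …, 0]: found case.  Capacities seen are n-m, …, n-1.
theorem A_found (m : Nat) : ∀ (n k j r : Int),
    (m : Int) ≤ n - 1 →
    n - m ≤ j → j ≤ n - 1 → 1 ≤ r → r ≤ j →
    k = Tn (j - 1).toNat - Tn (n - 1 - m).toNat + r →
    solveGo n (PySem.List.pyRange ((m : Int) - 1) (-1) (-1)) k
      = some (String.mk (((List.replicate n.toNat 'a').set (n - 1 - j).toNat 'b').set (n - r).toNat 'b')) := by
  induction m with
  | zero => intro n k j r h1 h2 h3 h4 h5 h6; omega
  | succ m ih =>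
    intro n k j r h1 h2 h3 h4 h5 h6
    have hcons : PySem.List.pyRange ((↑(m + 1) : Int) - 1) (-1) (-1)
        = ((m : Int)) :: PySem.List.pyRange ((m : Int) - 1) (-1) (-1) := by
      have hexp : ((↑(m + 1) : Int) - 1) = (m : Int) := by push_cast; omega
      rw [hexp, PySem.List.pyRange_neg_one_cons (by omega : (-1 : Int) < (m : Int))]
    rw [hcons]
    have e0 : n - 1 - (↑(m + 1) : Int) = n - m - 2 := by push_cast; ring
    rw [e0] at h6
    have hj1 : 1 ≤ j := by omega
    have hnm2 : 0 ≤ n - m - 2 := by push_cast at h1; omega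
    by_cases hcase : j = n - m - 1
    · -- match at the top entry i = m : current k equals r
      have hkr : k = r := by
        have he : j - 1 = n - ↑m - 2 := by omega
        rw [h6, he]; omega
      have hcond : k ≤ n - (m : Int) - 1 := by omega
      simp only [solveGo, if_pos hcond]
      have e1 : ((m : Int)).toNat = (n - 1 - j).toNat := by omega
      have e2 : (n - k).toNat = (n - r).toNat := by omega
      rw [e1, e2]
    · -- capacity n-m-1 too small: subtract and recurse
      have hjge : n - (m : Int) ≤ j := by omega
      have hstep : Tn (n - m - 1).toNat = Tn (n - m - 2).toNat + (n - m - 1) := by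
        have := Tn_step_int (n - m - 2) hnm2
        have e : n - m - 2 + 1 = n - m - 1 := by omega
        rw [e] at this; exact this
      have hmono : Tn (n - m - 1).toNat ≤ Tn (j - 1).toNat :=
        Tn_mono_int (by omega) (by omega)
      have hgt : ¬ k ≤ n - (m : Int) - 1 := by omega
      simp only [solveGo, if_neg hgt]
      apply ih n (k - (n - (m : Int) - 1)) j r (by push_cast at h1 ⊢; omega) hjge h3 h4 h5
      have e : n - 1 - (m : Int) = n - m - 1 := by omega
      rw [e, hstep]; omega

-- A's loop: exhausted case (k larger than the sum of the remaining capacities)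
theorem A_none (m : Nat) : ∀ (n k : Int),
    (m : Int) ≤ n - 1 →
    Tn (n - 1).toNat - Tn (n - 1 - m).toNat < k →
    solveGo n (PySem.List.pyRange ((m : Int) - 1) (-1) (-1)) k = none := by
  induction m with
  | zero =>
    intro n k h1 h2
    have h0 : PySem.List.pyRange (((0 : Nat) : Int) - 1) (-1) (-1) = [] :=
      PySem.List.pyRange_neg_one_eq_nil (by norm_num)
    rw [h0]
    rfl
  | succ m ih =>
    intro n k h1 h2
    have hcons : PySem.List.pyRange ((↑(m + 1) : Int) - 1) (-1) (-1)
        = ((m : Int)) :: PySem.List.pyRange ((m : Int) - 1) (-1) (-1) := by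
      have hexp : ((↑(m + 1) : Int) - 1) = (m : Int) := by push_cast; omega
      rw [hexp, PySem.List.pyRange_neg_one_cons (by omega : (-1 : Int) < (m : Int))]
    rw [hcons]
    have hnm2 : 0 ≤ n - m - 2 := by push_cast at h1; omega
    have hstep : Tn (n - m - 1).toNat = Tn (n - m - 2).toNat + (n - m - 1) := by
      have := Tn_step_int (n - m - 2) hnm2
      have e : n - m - 2 + 1 = n - m - 1 := by omega
      rw [e] at this; exact this
    have hmono : Tn (n - m - 1).toNat ≤ Tn (n - 1).toNat :=
      Tn_mono_int (by omega) (by omega)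
    have h2' : Tn (n - 1).toNat - Tn (n - m - 2).toNat < k := by
      have e : n - 1 - (↑(m + 1) : Int) = n - m - 2 := by push_cast; omega
      rw [e] at h2; exact h2
    have hgt : ¬ k ≤ n - (m : Int) - 1 := by omega
    simp only [solveGo, if_neg hgt]
    apply ih n (k - (n - (m : Int) - 1)) (by push_cast at h1 ⊢; omega)
    have e : n - 1 - (m : Int) = n - m - 1 := by omega
    rw [e, hstep]; omega

-- ===== VERDICT (by name: the statement is the Claim_ definition above) =====
theorem solve_spec : Claim_equal_solve := by
  unfold Claim_equal_solve Spec_solve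
  intro n k _ hpre
  by_cases hn : n < 2
  · -- empty loop on both sides
    have : solve n k = none := by
      unfold solve
      rw [PySem.List.pyRange_neg_one_eq_nil (by omega : n - 2 ≤ -1)]
      rfl
    rw [this]
    unfold solve_alt
    rw [if_pos (Or.inl hn)]
  · have hk1 : 1 ≤ k := by rcases hpre with h | h; omega; exact h
    have hfdn : PySem.Int.floordiv ((n - 1) * n) 2 = Tn (n - 1).toNat := by
      have e : (n - 1) * n = (n - 1) * ((n - 1) + 1) := by ring
      rw [e, fd_Tn (n - 1) (by omega)]
    have hm : ((n - 1).toNat : Int) = n - 1 := by omega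
    by_cases hbig : Tn (n - 1).toNat < k
    · -- k beyond the last triangular number: both return none
      have hA : solve n k = none := by
        unfold solve
        have e : n - 2 = ((n - 1).toNat : Int) - 1 := by omega
        rw [e]
        apply A_none (n - 1).toNat n k (by omega)
        have e2 : n - 1 - ((n - 1).toNat : Int) = 0 := by omega
        rw [e2, Int.toNat_zero, show Tn 0 = 0 from rfl]; omega
      rw [hA]
      unfold solve_alt
      rw [if_pos (Or.inr (Or.inr (by rw [hfdn]; exact hbig)))]
    · -- found case: binary search finds the same j, same remainder r
      push_neg at hbig
      obtain ⟨hj1, hjhi, hjlt, hjle⟩ :=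
        bsearchB_spec (n - 1 - 1).toNat k 1 (n - 1) rfl (le_refl 1) (by omega)
          (by rw [show ((1:Int) - 1).toNat = 0 by decide, show Tn 0 = 0 from rfl]; omega) hbig
      set j := bsearchB k 1 (n - 1) with hjdef
      have hfdj : PySem.Int.floordiv ((j - 1) * j) 2 = Tn (j - 1).toNat := by
        have e : (j - 1) * j = (j - 1) * ((j - 1) + 1) := by ring
        rw [e, fd_Tn (j - 1) (by omega)]
      have hstep : Tn j.toNat = Tn (j - 1).toNat + j := by
        have := Tn_step_int (j - 1) (by omega)
        have e : j - 1 + 1 = j := by omega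
        rw [e] at this; omega
      set r := k - Tn (j - 1).toNat with hrdef
      have hA : solve n k
          = some (String.mk (((List.replicate n.toNat 'a').set (n - 1 - j).toNat 'b').set (n - r).toNat 'b')) := by
        unfold solve
        have e : n - 2 = ((n - 1).toNat : Int) - 1 := by omega
        rw [e]
        apply A_found (n - 1).toNat n k j r (by omega) (by omega) hjhi (by omega) (by omega)
        have e2 : n - 1 - ((n - 1).toNat : Int) = 0 := by omega
        rw [e2, Int.toNat_zero, show Tn 0 = 0 from rfl]; omega
      rw [hA]
      unfold solve_alt
      rw [if_neg (by push_neg; exact ⟨by omega, by omega, by rw [hfdn]; omega⟩)]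
      simp only [← hjdef, hfdj, ← hrdef]
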